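-- pv_equiv track=rewrite | github.com/shao4321/My-CS50-IDE-Content | Practices1/Coding_Qns/stringlikesquare.py | create_square
-- ===== SOURCE A (Python) =====
-- def create_square(length):
-- 	if not length or length <= 0:
-- 		return ''
-- 	s = ''
-- 	for i in range(length):
-- 		if i == 0 or i == length - 1:
-- 			for k in range(length):
-- 				s += '#'
-- 			s += '\n'
-- 			continue
-- 		s += '#'
-- 		for k in range(length-2):
-- 			s += ' '
-- 		s += '#'
-- 		s += '\n'
-- 	s = s.strip('\n')
-- 	return s
-- ===== SOURCE B (Python) =====
-- def create_square(length):
--     if length <= 0: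
--         return ''
--     if length == 1:
--         return '#'
--     border = '#' * length
--     middle = '#' + ' ' * (length - 2) + '#'
--     return '\n'.join([border] + [middle] * (length - 2) + [border])
-- ===== Notes on version B (the rewrite author's own statement) =====
-- stated objective: simpler
-- what changed: A accumulates the figure character by character in a double loop with an index branch per row; B computes the border and middle row strings once and joins [border] + [middle]*(length-2) + [border] with newlines (with an explicit 1x1 case).
import Mathlib
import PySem

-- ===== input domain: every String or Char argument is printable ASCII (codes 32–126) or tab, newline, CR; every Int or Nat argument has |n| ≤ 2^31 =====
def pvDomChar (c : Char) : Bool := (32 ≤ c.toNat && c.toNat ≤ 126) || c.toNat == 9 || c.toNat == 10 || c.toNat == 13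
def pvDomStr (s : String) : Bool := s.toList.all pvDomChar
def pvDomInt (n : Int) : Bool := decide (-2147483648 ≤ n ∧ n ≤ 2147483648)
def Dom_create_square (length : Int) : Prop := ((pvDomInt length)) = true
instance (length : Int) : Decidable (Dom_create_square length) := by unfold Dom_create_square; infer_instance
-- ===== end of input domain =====

-- B builds the square structurally from a border row and a replicated middle row joined by newlines,
-- instead of A's character-by-character accumulation with a per-row index branch (objective: simpler).

-- ===== PORT A =====
-- s.strip('\n') : drop '\n' from both ends (exact for Python str.strip('\n'))
def stripNL (cs : List Char) : List Char :=
  ((cs.dropWhile (· == '\n')).reverse.dropWhile (· == '\n')).reverse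

def create_square (length : Int) : String :=
  if length = 0 ∨ length ≤ 0 then "" else
    let s : List Char :=
      (PySem.List.pyRange 0 length 1).foldl (fun s i =>
        if i = 0 ∨ i = length - 1 then
          ((PySem.List.pyRange 0 length 1).foldl (fun s _ => s ++ ['#']) s) ++ ['\n']
        else
          (((PySem.List.pyRange 0 (length - 2) 1).foldl (fun s _ => s ++ [' ']) (s ++ ['#'])) ++ ['#']) ++ ['\n'])
        []
    String.ofList (stripNL s)

-- ===== PORT B =====
def create_square_alt (length : Int) : String :=
  if length ≤ 0 then "" else
  if length = 1 then "#" else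
    let n := length.toNat
    let border : List Char := List.replicate n '#'
    let middle : List Char := '#' :: (List.replicate (n - 2) ' ' ++ ['#'])
    String.ofList (List.intercalate ['\n'] ([border] ++ List.replicate (n - 2) middle ++ [border]))

-- ===== PRECONDITION & SPEC =====
def Spec_create_square (length : Int) (out : String) : Prop := out = create_square_alt length
instance (length : Int) (out : String) : Decidable (Spec_create_square length out) := by unfold Spec_create_square; infer_instance

-- ===== CLAIM (what is proved, stated in full; the proofs are below) =====
def Claim_equal_create_square : Prop := ∀ (length : Int), Dom_create_square length → Spec_create_square length (create_square length)

-- ===== LEMMAS AND PROOFS =====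

-- appending one constant char per loop iteration = appending a replicate
lemma foldl_app_const (l : List Int) (s : List Char) (c : Char) :
    l.foldl (fun s _ => s ++ [c]) s = s ++ List.replicate l.length c := by
  rw [PySem.List.foldl_append_singleton_eq_map (fun _ => c) l s, List.map_const']

-- join-with-'\n' plus a trailing '\n' = concatenation of rows each ending in '\n'
lemma intercalate_append_sep (sep : List Char) (x : List Char) (xs : List (List Char)) :
    List.intercalate sep (x :: xs) ++ sep = (x :: xs).flatMap (· ++ sep) := by
  induction xs generalizing x with
  | nil => simp [List.intercalate]
  | cons y ys ih =>
    have hcc : List.intercalate sep (x :: y :: ys) = x ++ sep ++ List.intercalate sep (y :: ys) := by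
      simp [List.intercalate, List.intersperse]
    rw [hcc, List.flatMap_cons, List.append_assoc, List.append_assoc, ← ih y]
    simp

lemma stripNL_of_hash_ends (x : List Char) (h1 : x.head? = some '#') (h2 : x.getLast? = some '#') :
    stripNL (x ++ ['\n']) = x := by
  unfold stripNL
  obtain ⟨a, t, rfl⟩ : ∃ a t, x = a :: t := by
    cases x with
    | nil => simp at h1
    | cons a t => exact ⟨a, t, rfl⟩
  have ha : a = '#' := by simpa using h1
  subst ha
  rw [List.cons_append, List.dropWhile_cons_of_neg (by decide)]
  rw [show ('#' :: (t ++ ['\n'])).reverse = '\n' :: (t.reverse ++ ['#']) from by simp]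
  rw [List.dropWhile_cons_of_pos (by decide)]
  have hrest : List.dropWhile (· == '\n') (t.reverse ++ ['#']) = t.reverse ++ ['#'] := by
    cases htr : t.reverse with
    | nil => decide
    | cons b bs =>
      have hb : b = '#' := by
        have h2' : ('#' :: t).getLast? = some b := by
          rw [show ('#' :: t) = ['#'] ++ t from rfl, List.getLast?_append,
              ← List.head?_reverse, htr]
          simp
        rw [h2] at h2'
        exact (Option.some_inj.mp h2').symm
      subst hb
      rw [List.cons_append, List.dropWhile_cons_of_neg (by decide)]
  rw [hrest]
  simp

-- a flatMap of a constant row is a flattened replicate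
lemma flatMap_const_eq {a b : Type} (l : List a) (c : List b) :
    l.flatMap (fun _ => c) = (List.replicate l.length c).flatten := by
  induction l with
  | nil => simp
  | cons x xs ih => simp [List.replicate_succ, ih]

lemma flatMap_rep_append {b : Type} (k : Nat) (m sep : List b) :
    (List.replicate k m).flatMap (· ++ sep) = (List.replicate k (m ++ sep)).flatten := by
  induction k with
  | zero => simp
  | succ j ih => simp [List.replicate_succ, ih]

theorem create_square_eq (length : Int) : create_square length = create_square_alt length := by
  by_cases hle : length ≤ 0
  · simp [create_square, create_square_alt, hle]
  · rw [not_le] at hle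
    by_cases h1 : length = 1
    · subst h1; decide
    · -- length ≥ 2
      have h2 : 2 ≤ length := by omega
      obtain ⟨n, rfl⟩ : ∃ n : Nat, length = (n : Int) := ⟨length.toNat, by omega⟩
      have hn : 2 ≤ n := by exact_mod_cast h2
      unfold create_square create_square_alt
      rw [if_neg (by omega), if_neg (by omega), if_neg (by exact_mod_cast h1)]
      simp only [Int.toNat_natCast]
      -- split the outer range as [0] ++ middle ++ [n-1]
      have hsplit : PySem.List.pyRange 0 (n : Int) 1 =
          PySem.List.pyRange 0 1 1 ++ (PySem.List.pyRange 1 ((n : Int) - 1) 1 ++ PySem.List.pyRange ((n : Int) - 1) (n : Int) 1) := by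
        rw [← PySem.List.pyRange_one_append 1 ((n : Int) - 1) (n : Int) (by omega) (by omega),
            ← PySem.List.pyRange_one_append 0 1 (n : Int) (by omega) (by omega)]
      set border : List Char := List.replicate n '#' with hborder
      set middle : List Char := '#' :: (List.replicate (n - 2) ' ' ++ ['#']) with hmiddle
      -- the loop body appends one full row per index
      have hbody : ∀ (s : List Char) (i : Int),
          (if i = 0 ∨ i = (n : Int) - 1 then
            ((PySem.List.pyRange 0 (n : Int) 1).foldl (fun s _ => s ++ ['#']) s) ++ ['\n']
          else
            (((PySem.List.pyRange 0 ((n : Int) - 2) 1).foldl (fun s _ => s ++ [' ']) (s ++ ['#'])) ++ ['#']) ++ ['\n'])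
          = s ++ ((if i = 0 ∨ i = (n : Int) - 1 then border else middle) ++ ['\n']) := by
        intro s i
        by_cases hi : i = 0 ∨ i = (n : Int) - 1
        · rw [if_pos hi, if_pos hi, foldl_app_const]
          simp [hborder, PySem.List.length_pyRange_one]
        · rw [if_neg hi, if_neg hi, foldl_app_const]
          simp [hmiddle, PySem.List.length_pyRange_one,
            show ((n : Int) - 2).toNat = n - 2 from by omega, List.append_assoc]
      -- the whole fold is the concatenation of the rows
      have hfold : ∀ (l : List Int) (s : List Char),
          l.foldl (fun s i =>
            if i = 0 ∨ i = (n : Int) - 1 then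
              ((PySem.List.pyRange 0 (n : Int) 1).foldl (fun s _ => s ++ ['#']) s) ++ ['\n']
            else
              (((PySem.List.pyRange 0 ((n : Int) - 2) 1).foldl (fun s _ => s ++ [' ']) (s ++ ['#'])) ++ ['#']) ++ ['\n']) s
          = s ++ l.flatMap (fun i => (if i = 0 ∨ i = (n : Int) - 1 then border else middle) ++ ['\n']) := by
        intro l s
        rw [show (fun (s : List Char) (i : Int) =>
            if i = 0 ∨ i = (n : Int) - 1 then
              ((PySem.List.pyRange 0 (n : Int) 1).foldl (fun s _ => s ++ ['#']) s) ++ ['\n']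
            else
              (((PySem.List.pyRange 0 ((n : Int) - 2) 1).foldl (fun s _ => s ++ [' ']) (s ++ ['#'])) ++ ['#']) ++ ['\n'])
          = (fun s i => s ++ ((if i = 0 ∨ i = (n : Int) - 1 then border else middle) ++ ['\n']))
          from funext fun s => funext fun i => hbody s i]
        exact PySem.List.foldl_append_eq_flatMap _ l s
      rw [hfold, List.nil_append, hsplit]
      simp only [List.flatMap_append]
      -- evaluate the three pieces
      have hfirst : (PySem.List.pyRange 0 1 1).flatMap
          (fun i => (if i = 0 ∨ i = (n : Int) - 1 then border else middle) ++ ['\n']) = border ++ ['\n'] := by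
        rw [PySem.List.pyRange_one_cons (by omega), PySem.List.pyRange_one_eq_nil (by omega)]
        simp
      have hlast : (PySem.List.pyRange ((n : Int) - 1) (n : Int) 1).flatMap
          (fun i => (if i = 0 ∨ i = (n : Int) - 1 then border else middle) ++ ['\n']) = border ++ ['\n'] := by
        rw [PySem.List.pyRange_one_cons (by omega), PySem.List.pyRange_one_eq_nil (by omega)]
        simp
      have hmid : (PySem.List.pyRange 1 ((n : Int) - 1) 1).flatMap
          (fun i => (if i = 0 ∨ i = (n : Int) - 1 then border else middle) ++ ['\n'])
          = (List.replicate (n - 2) (middle ++ ['\n'])).flatten := by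
        rw [List.flatMap_congr (g := fun _ => middle ++ ['\n']) ?_]
        · rw [flatMap_const_eq, PySem.List.length_pyRange_one,
              show ((n : Int) - 1 - 1).toNat = n - 2 from by omega]
        · intro i hi
          rw [PySem.List.mem_pyRange_one] at hi
          rw [if_neg (by omega)]
      rw [hfirst, hmid, hlast]
      -- B side: the joined rows, with one '\n' appended, are exactly A's pre-strip string
      have hrowsne : ([border] ++ List.replicate (n - 2) middle ++ [border] : List (List Char))
          = border :: (List.replicate (n - 2) middle ++ [border]) := by simp
      set M : List Char := (List.replicate (n - 2) (middle ++ ['\n'])).flatten with hM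
      have hMrep : (List.replicate (n - 2) middle ++ [border]).flatMap (· ++ ['\n'])
          = M ++ (border ++ ['\n']) := by
        rw [hM, List.flatMap_append, flatMap_rep_append]
        simp
      set X : List Char := (border ++ ['\n']) ++ (M ++ border) with hX
      have hinter : List.intercalate ['\n'] ([border] ++ List.replicate (n - 2) middle ++ [border]) = X := by
        apply List.append_cancel_right (bs := ['\n'])
        rw [hrowsne, intercalate_append_sep]
        rw [List.flatMap_cons, hMrep, hX]
        simp
      rw [hinter]
      congr 1
      have harg : (border ++ ['\n']) ++ (M ++ (border ++ ['\n'])) = X ++ ['\n'] := by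
        simp [hX]
      rw [harg]
      apply stripNL_of_hash_ends
      · rw [hX]
        have hb : border.head? = some '#' := by
          rw [hborder]
          cases n with
          | zero => omega
          | succ k => simp [List.replicate_succ]
        simp [List.head?_append, hb]
      · rw [hX]
        have hb : border.getLast? = some '#' := by
          rw [hborder, List.getLast?_replicate, if_neg (by omega)]
        rw [show border ++ ['\n'] ++ (M ++ border) = (border ++ ['\n'] ++ M) ++ border from by
          simp]
        rw [List.getLast?_append, hb]
        simp

-- ===== VERDICT (by name: the statement is the Claim_ definition above) =====
theorem create_square_spec : Claim_equal_create_square := by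
  intro length _
  unfold Spec_create_square
  exact create_square_eq length
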